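-- pv_equiv track=rewrite | github.com/glucosei/practice_baekjoon | 1208번.py | count_sums
-- ===== SOURCE A (Python) =====
-- from itertools import combinations
-- from bisect import bisect_left, bisect_right
--
-- def get_subsums(arr):
--     subsums = []
--     n = len(arr)
--     for i in range(n + 1):
--         for comb in combinations(arr, i):
--             subsums.append(sum(comb))
--     return subsums
--
-- def count_sums(S, left, right):
--     left_sums = get_subsums(left)
--     right_sums = get_subsums(right)
--
--     left_sums.sort()
--     count = 0
--
--     for r in right_sums:
--         target = S - r
--         count += bisect_right(left_sums, target) - bisect_left(left_sums, target)
--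
--     return count - (1 if S == 0 else 0)
-- ===== SOURCE B (Python) =====
-- from itertools import combinations
--
-- def get_subsums(arr):
--     subsums = []
--     n = len(arr)
--     for i in range(n + 1):
--         for comb in combinations(arr, i):
--             subsums.append(sum(comb))
--     return subsums
--
-- def count_sums(S, left, right):
--     # Sort both halves (left ascending, right descending) and count the
--     # pairs summing to S with a single two-pointer merge scan over runs
--     # of equal values, instead of a binary search per right-hand sum.
--     L = sorted(get_subsums(left))
--     R = sorted(get_subsums(right), reverse=True)
--     nL, nR = len(L), len(R)
--     count = 0
--     i, j = 0, 0
--     while i < nL and j < nR: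
--         t = L[i] + R[j]
--         if t < S:
--             i += 1
--         elif t > S:
--             j += 1
--         else:
--             i2 = i + 1
--             while i2 < nL and L[i2] == L[i]:
--                 i2 += 1
--             j2 = j + 1
--             while j2 < nR and R[j2] == R[j]:
--                 j2 += 1
--             count += (i2 - i) * (j2 - j)
--             i, j = i2, j2
--     return count - (1 if S == 0 else 0)
-- ===== Notes on version B (the rewrite author's own statement) =====
-- stated objective: alternative
-- what changed: Replaces A's per-element binary searches (bisect_right/bisect_left on the sorted left sums for every right sum) with a single two-pointer merge scan over both halves sorted in opposite directions, multiplying run lengths of equal values when the target sum is hit.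
import Mathlib
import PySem

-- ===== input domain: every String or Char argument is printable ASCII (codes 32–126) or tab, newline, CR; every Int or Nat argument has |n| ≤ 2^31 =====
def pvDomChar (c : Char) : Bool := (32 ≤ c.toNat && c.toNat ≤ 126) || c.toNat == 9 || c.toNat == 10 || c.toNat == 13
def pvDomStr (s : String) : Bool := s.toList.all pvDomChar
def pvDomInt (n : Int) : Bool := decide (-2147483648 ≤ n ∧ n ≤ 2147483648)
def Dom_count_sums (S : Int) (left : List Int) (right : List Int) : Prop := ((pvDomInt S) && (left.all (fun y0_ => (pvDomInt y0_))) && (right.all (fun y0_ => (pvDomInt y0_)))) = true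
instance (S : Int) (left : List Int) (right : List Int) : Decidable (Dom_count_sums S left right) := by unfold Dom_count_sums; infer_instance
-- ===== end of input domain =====

-- B replaces A's per-right-sum pair of binary searches by one two-pointer merge scan
-- over the two halves sorted in opposite directions (objective: alternative).

-- ===== PORT A =====
-- itertools.combinations(xs, k), in Python's (index-lexicographic) order
def pvCombs : List Int → Nat → List (List Int)
  | _, 0 => [[]]
  | [], _ + 1 => []
  | x :: xs, k + 1 => (pvCombs xs k).map (x :: ·) ++ pvCombs xs (k + 1)

-- get_subsums (identical helper in Source A and Source B)
def getSubsums (arr : List Int) : List Int :=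
  (List.range (arr.length + 1)).foldl
    (fun subsums i => (pvCombs arr i).foldl (fun acc c => acc ++ [c.sum]) subsums) []

def count_sums (S : Int) (left : List Int) (right : List Int) : Int :=
  let left_sums := getSubsums left
  let right_sums := getSubsums right
  let left_sorted := PySem.List.sorted left_sums (fun x => x) false   -- left_sums.sort()
  let count := right_sums.foldl
    (fun count r =>
      let target := S - r
      count + ((PySem.List.bisectRight left_sorted target : Int)
               - (PySem.List.bisectLeft left_sorted target : Int))) 0
  count - (if S = 0 then 1 else 0)

-- ===== PORT B =====
-- the inner 'while' runs of Source B: length of the leading run of value v, and the rest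
def spanEq (v : Int) : List Int → Nat × List Int
  | [] => (0, [])
  | x :: xs => if x = v then ((spanEq v xs).1 + 1, (spanEq v xs).2) else (0, x :: xs)

theorem spanEq_len_le (v : Int) (xs : List Int) : (spanEq v xs).2.length ≤ xs.length := by
  induction xs with
  | nil => simp [spanEq]
  | cons x xs ih =>
    by_cases h : x = v <;> simp [spanEq, h]
    omega

-- the outer 'while' of Source B over the two remaining suffixes
def tp (S : Int) : List Int → List Int → Int
  | [], _ => 0
  | _ :: _, [] => 0
  | l :: ls, r :: rs =>
    if l + r < S then tp S ls (r :: rs)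
    else if S < l + r then tp S (l :: ls) rs
    else
      (((spanEq l ls).1 : Int) + 1) * (((spanEq r rs).1 : Int) + 1)
        + tp S (spanEq l ls).2 (spanEq r rs).2
termination_by L R => L.length + R.length
decreasing_by
  all_goals
    (have h1 := spanEq_len_le l ls
     have h2 := spanEq_len_le r rs
     simp
     all_goals omega)

def count_sums_alt (S : Int) (left : List Int) (right : List Int) : Int :=
  let L := PySem.List.sorted (getSubsums left) (fun x => x) false           -- sorted(...)
  let R := PySem.List.sorted (getSubsums right) (fun x => x) true           -- sorted(..., reverse=True)
  tp S L R - (if S = 0 then 1 else 0)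

-- ===== PRECONDITION & SPEC =====
def Spec_count_sums (S : Int) (left : List Int) (right : List Int) (out : Int) : Prop := out = count_sums_alt S left right
instance (S : Int) (left : List Int) (right : List Int) (out : Int) : Decidable (Spec_count_sums S left right out) := by unfold Spec_count_sums; infer_instance

-- ===== CLAIM (what is proved, stated in full; the proofs are below) =====
def Claim_equal_count_sums : Prop := ∀ (S : Int) (left : List Int) (right : List Int), Dom_count_sums S left right → Spec_count_sums S left right (count_sums S left right)

-- ===== LEMMAS AND PROOFS =====

-- On an Int list, #(≤ x) = #(< x) + #(= x)
theorem countP_le_split (xs : List Int) (x : Int) :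
    xs.countP (fun y => decide (y ≤ x)) = xs.countP (fun y => decide (y < x)) + xs.count x := by
  induction xs with
  | nil => simp
  | cons a t ih =>
    by_cases hax : a = x
    · subst hax
      simp [ih]
      omega
    · simp [List.countP_cons, hax, ih]
      by_cases h1 : a ≤ x
      · have h2 : a < x := lt_of_le_of_ne h1 hax
        simp [h1, h2]; omega
      · have h2 : ¬ a < x := fun h => h1 h.le
        simp [h1, h2]

-- On a sorted list, countP of a "< x" (resp. "≤ x") prefix predicate equals the bisect index.
theorem countP_eq_of_split (xs : List Int) (p : Int → Bool) (k : Nat) (hk : k ≤ xs.length)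
    (h1 : ∀ (j : Nat) (hj : j < xs.length), j < k → p xs[j])
    (h2 : ∀ (j : Nat) (hj : j < xs.length), k ≤ j → ¬ p xs[j]) :
    xs.countP p = k := by
  have hsplit : xs = xs.take k ++ xs.drop k := (List.take_append_drop k xs).symm
  rw [hsplit, List.countP_append]
  have ht : (xs.take k).countP p = (xs.take k).length := by
    rw [List.countP_eq_length]
    intro a ha
    obtain ⟨j, hj, rfl⟩ := List.mem_iff_getElem.mp ha
    have hjk : j < k := by simp [List.length_take] at hj; omega
    have hjlen : j < xs.length := lt_of_lt_of_le hjk hk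
    have : (xs.take k)[j] = xs[j] := List.getElem_take
    rw [this]
    exact h1 j hjlen hjk
  have hd : (xs.drop k).countP p = 0 := by
    rw [List.countP_eq_zero]
    intro a ha
    obtain ⟨j, hj, rfl⟩ := List.mem_iff_getElem.mp ha
    have hjlen : k + j < xs.length := by simpa [Nat.lt_sub_iff_add_lt'] using hj
    have : (xs.drop k)[j] = xs[k + j] := List.getElem_drop
    rw [this]
    exact h2 (k + j) hjlen (Nat.le_add_right k j)
  rw [ht, hd, List.length_take]
  omega

-- bisect_right − bisect_left on a sorted list = multiplicity
theorem bisect_diff_eq_count (xs : List Int) (x : Int)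
    (hs : xs.Pairwise (fun a b => a ≤ b)) :
    (PySem.List.bisectRight xs x : Int) - (PySem.List.bisectLeft xs x : Int) = (xs.count x : Int) := by
  obtain ⟨hbl_le, hbl1, hbl2⟩ := PySem.List.bisectLeft_spec xs x hs
  obtain ⟨hbr_le, hbr1, hbr2⟩ := PySem.List.bisectRight_spec xs x hs
  have hlt : xs.countP (fun y => decide (y < x)) = PySem.List.bisectLeft xs x := by
    apply countP_eq_of_split xs _ _ hbl_le
    · intro j hj h; simpa using hbl1 j hj h
    · intro j hj h; simpa using not_lt.mpr (hbl2 j hj h)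
  have hle : xs.countP (fun y => decide (y ≤ x)) = PySem.List.bisectRight xs x := by
    apply countP_eq_of_split xs _ _ hbr_le
    · intro j hj h; simpa using hbr1 j hj h
    · intro j hj h; simpa using not_le.mpr (hbr2 j hj h)
  have := countP_le_split xs x
  omega

-- spanEq on an ascending list all of whose elements are ≥ v: leading run + strictly larger rest
theorem spanEq_asc (v : Int) (xs : List Int) (hs : xs.Pairwise (fun a b => a ≤ b))
    (hv : ∀ y ∈ xs, v ≤ y) :
    xs = List.replicate (spanEq v xs).1 v ++ (spanEq v xs).2 ∧
    ∀ y ∈ (spanEq v xs).2, v < y := by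
  induction xs with
  | nil => simp [spanEq]
  | cons x xs ih =>
    rcases List.pairwise_cons.mp hs with ⟨hx, hxs⟩
    by_cases h : x = v
    · subst h
      obtain ⟨h1, h2⟩ := ih hxs hx
      constructor
      · simp [spanEq, List.replicate_succ]
        exact h1
      · simpa [spanEq] using h2
    · have hvx : v < x := lt_of_le_of_ne (hv x (by simp)) (fun e => h e.symm)
      refine ⟨by simp [spanEq, h], ?_⟩
      intro y hy
      simp [spanEq, h] at hy
      rcases hy with rfl | hy
      · exact hvx
      · exact lt_of_lt_of_le hvx (hx y hy)

-- spanEq on a descending list all of whose elements are ≤ v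
theorem spanEq_desc (v : Int) (xs : List Int) (hs : xs.Pairwise (fun a b => b ≤ a))
    (hv : ∀ y ∈ xs, y ≤ v) :
    xs = List.replicate (spanEq v xs).1 v ++ (spanEq v xs).2 ∧
    ∀ y ∈ (spanEq v xs).2, y < v := by
  induction xs with
  | nil => simp [spanEq]
  | cons x xs ih =>
    rcases List.pairwise_cons.mp hs with ⟨hx, hxs⟩
    by_cases h : x = v
    · subst h
      obtain ⟨h1, h2⟩ := ih hxs hx
      constructor
      · simp [spanEq, List.replicate_succ]
        exact h1
      · simpa [spanEq] using h2
    · have hvx : x < v := lt_of_le_of_ne (hv x (by simp)) h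
      refine ⟨by simp [spanEq, h], ?_⟩
      intro y hy
      simp [spanEq, h] at hy
      rcases hy with rfl | hy
      · exact hvx
      · exact lt_of_le_of_lt (hx y hy) hvx

-- the two-pointer scan counts, for each right element, the multiplicity of S - r on the left
theorem tp_spec (S : Int) (L R : List Int) (hL : L.Pairwise (fun a b => a ≤ b))
    (hR : R.Pairwise (fun a b => b ≤ a)) :
    tp S L R = (R.map (fun r => (L.count (S - r) : Int))).sum := by
  induction L, R using tp.induct S with
  | case1 R => simp [tp]
  | case2 l ls => simp [tp]
  | case3 l ls r rs hlt ih =>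
    rcases List.pairwise_cons.mp hL with ⟨hl, hls⟩
    rw [tp]
    simp only [hlt, if_pos]
    rw [ih hls hR]
    refine congrArg List.sum (List.map_congr_left ?_)
    intro r' hr'
    have hr'r : r' ≤ r := by
      rcases List.mem_cons.mp hr' with rfl | h
      · exact le_refl _
      · exact (List.pairwise_cons.mp hR).1 r' h
    simp [List.count_cons]
    omega
  | case4 l ls r rs hlt hgt ih =>
    rcases List.pairwise_cons.mp hR with ⟨hr, hrs⟩
    rw [tp]
    simp only [hlt, hgt, if_pos]
    rw [ih hL hrs]
    have hz : (l :: ls).count (S - r) = 0 := by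
      rw [List.count_eq_zero]
      intro hmem
      rcases List.mem_cons.mp hmem with h | h
      · omega
      · have := (List.pairwise_cons.mp hL).1 _ h
        omega
    simp [hz]
  | case5 l ls r rs hlt hgt ih =>
    have heq : l + r = S := by omega
    rcases List.pairwise_cons.mp hL with ⟨hlle, hls⟩
    rcases List.pairwise_cons.mp hR with ⟨hrge, hrs⟩
    obtain ⟨hLsplit, hLrest⟩ := spanEq_asc l ls hls hlle
    obtain ⟨hRsplit, hRrest⟩ := spanEq_desc r rs hrs hrge
    set cl := (spanEq l ls).1 with hcl
    set ls' := (spanEq l ls).2 with hls'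
    set cr := (spanEq r rs).1 with hcr
    set rs' := (spanEq r rs).2 with hrs'
    have hls'_sorted : ls'.Pairwise (fun a b => a ≤ b) := by
      have : ls'.Sublist ls := by rw [hLsplit]; exact List.sublist_append_right _ _
      exact hls.sublist this
    have hrs'_sorted : rs'.Pairwise (fun a b => b ≤ a) := by
      have : rs'.Sublist rs := by rw [hRsplit]; exact List.sublist_append_right _ _
      exact hrs.sublist this
    rw [tp]
    simp only [hlt, hgt]
    rw [ih hls'_sorted hrs'_sorted]
    -- left count of l
    have hcount_l : (l :: ls).count l = cl + 1 := by
      have hnot : ls'.count l = 0 := by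
        rw [List.count_eq_zero]
        intro h
        exact absurd rfl (ne_of_gt (hLrest l h))
      rw [List.count_cons_self, hLsplit, List.count_append, List.count_replicate, hnot]
      simp
    -- for r' < r, the count of S - r' skips the whole leading run of l
    have hskip : ∀ r' ∈ rs', (l :: ls).count (S - r') = ls'.count (S - r') := by
      intro r' h
      have : r' < r := hRrest r' h
      have hne : S - r' ≠ l := by omega
      have hne' : l ≠ S - r' := by omega
      rw [hLsplit]
      simp [List.count_append, List.count_replicate, hne']
    -- split the right list into the run of r and the rest
    have hRconsSplit : r :: rs = List.replicate (cr + 1) r ++ rs' := by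
      rw [List.replicate_succ]
      simp [hRsplit]
    rw [hRconsSplit, List.map_append, List.sum_append, List.map_replicate,
      List.sum_replicate]
    have hSr : S - r = l := by omega
    rw [hSr, hcount_l]
    have hrest :
        (rs'.map (fun r' => ((l :: ls).count (S - r') : Int))).sum
          = (rs'.map (fun r' => (ls'.count (S - r') : Int))).sum := by
      refine congrArg List.sum (List.map_congr_left ?_)
      intro r' h
      rw [hskip r' h]
    rw [hrest]
    simp
    ring

-- A's bisect loop computes the same per-element counts, summed over the unsorted right list
theorem count_sums_eq (S : Int) (left : List Int) (right : List Int) :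
    count_sums S left right = count_sums_alt S left right := by
  unfold count_sums count_sums_alt
  simp only
  congr 1
  set Ls := PySem.List.sorted (getSubsums left) (fun x => x) false with hLs
  set Rs := PySem.List.sorted (getSubsums right) (fun x => x) true with hRs
  have hLsorted : Ls.Pairwise (fun a b => a ≤ b) :=
    PySem.List.sorted_pairwise (getSubsums left) (fun x => x)
  have hRsorted : Rs.Pairwise (fun a b => b ≤ a) :=
    PySem.List.sorted_pairwise_rev (getSubsums right) (fun x => x)
  rw [PySem.List.foldl_add, zero_add, tp_spec S Ls Rs hLsorted hRsorted]
  have hptwise :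
      (getSubsums right).map
          (fun r => (PySem.List.bisectRight Ls (S - r) : Int)
                    - (PySem.List.bisectLeft Ls (S - r) : Int))
        = (getSubsums right).map (fun r => (Ls.count (S - r) : Int)) := by
    refine List.map_congr_left ?_
    intro r _
    exact bisect_diff_eq_count Ls (S - r) hLsorted
  rw [hptwise]
  have hperm : (Rs.map (fun r => (Ls.count (S - r) : Int))).Perm
      ((getSubsums right).map (fun r => (Ls.count (S - r) : Int))) :=
    List.Perm.map _ (PySem.List.sorted_perm (getSubsums right) (fun x => x) true)
  have hsum := List.Perm.sum_eq hperm
  exact hsum.symm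

-- ===== VERDICT (by name: the statement is the Claim_ definition above) =====
theorem count_sums_spec : Claim_equal_count_sums := by
  intro S left right _
  exact count_sums_eq S left right
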